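-- pv_equiv track=rewrite | github.com/seligman/aoc | 2015/Helpers/day_25.py | calc
-- ===== SOURCE A (Python) =====
-- def calc(target_x, target_y):
--     x, y = 1, 1
--     value = 20151125
--
--     while x != target_x or y != target_y:
--         x += 1
--         y -= 1
--         if y == 0:
--             x, y = 1, x
--         value = (value * 252533) % 33554393
--
--     return value
-- ===== SOURCE B (Python) =====
-- def calc(target_x, target_y):
--     d = target_x + target_y - 2
--     n = d * (d + 1) // 2 + (target_x - 1)
--     return (20151125 * pow(252533, n, 33554393)) % 33554393
-- ===== Notes on version B (the rewrite author's own statement) =====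
-- stated objective: faster
-- what changed: Replaces the step-by-step diagonal walk (one modular multiply per cell) with the closed-form anti-diagonal index n = d(d+1)/2 + x-1 and a single modular exponentiation pow(252533, n, 33554393).
import Mathlib
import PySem

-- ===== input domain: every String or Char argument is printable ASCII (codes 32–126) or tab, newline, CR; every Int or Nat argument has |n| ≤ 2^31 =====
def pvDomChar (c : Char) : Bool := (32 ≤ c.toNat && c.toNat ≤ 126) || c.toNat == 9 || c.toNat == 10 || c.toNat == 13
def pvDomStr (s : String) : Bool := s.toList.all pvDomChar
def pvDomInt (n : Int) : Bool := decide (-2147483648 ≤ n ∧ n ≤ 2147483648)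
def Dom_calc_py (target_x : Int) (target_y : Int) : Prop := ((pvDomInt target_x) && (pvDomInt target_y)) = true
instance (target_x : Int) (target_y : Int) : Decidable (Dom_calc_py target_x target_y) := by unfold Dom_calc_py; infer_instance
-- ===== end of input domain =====

-- B replaces A's cell-by-cell diagonal walk by the closed-form index plus binary modular
-- exponentiation (objective: faster, asymptotically).

-- ===== PORT A =====
-- Index of cell (x,y) (1-based) in the diagonal enumeration; used only as FUEL making
-- A's while-loop total (the loop itself is the literal transliteration of A's body).
def pvTri (s : Nat) : Nat := s * (s + 1) / 2
def pvIdx (x y : Int) : Nat := pvTri ((x - 1).toNat + (y - 1).toNat) + (x - 1).toNat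

-- literal port of A's while-loop: state (x, y, value), one step per iteration
def calcLoop (fuel : Nat) (tx ty x y value : Int) : Int :=
  match fuel with
  | 0 => value
  | fuel + 1 =>
    if x ≠ tx ∨ y ≠ ty then
      let x' := x + 1
      let y' := y - 1
      let p : Int × Int := if y' = 0 then (1, x') else (x', y')
      calcLoop fuel tx ty p.1 p.2 ((value * 252533) % 33554393)
    else value

def calc_py (target_x : Int) (target_y : Int) : Int :=
  calcLoop (pvIdx target_x target_y) target_x target_y 1 1 20151125

-- ===== PORT B =====
-- binary modular exponentiation, as Python's three-argument pow computes it
def powmod (b : Int) (e : Nat) (m : Int) : Int :=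
  if e = 0 then 1 % m
  else
    let h := powmod b (e / 2) m
    let h2 := h * h % m
    if e % 2 = 1 then h2 * (b % m) % m else h2
decreasing_by exact Nat.div_lt_self (Nat.pos_of_ne_zero (by assumption)) (by omega)

def calc_py_alt (target_x : Int) (target_y : Int) : Int :=
  let d := target_x + target_y - 2
  let n := PySem.Int.floordiv (d * (d + 1)) 2 + (target_x - 1)
  (20151125 * powmod 252533 n.toNat 33554393) % 33554393

-- ===== PRECONDITION & SPEC =====
-- A's diagonal walk only ever visits cells with x ≥ 1 and y ≥ 1, so on any other
-- target the while-loop never terminates; Pre_ is exactly where A returns.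
def Pre_calc_py (target_x : Int) (target_y : Int) : Prop := 1 ≤ target_x ∧ 1 ≤ target_y
instance (target_x : Int) (target_y : Int) : Decidable (Pre_calc_py target_x target_y) := by
  unfold Pre_calc_py; infer_instance
def pvWitness_calc_py : Int × Int := (3, 4)

def Spec_calc_py (target_x : Int) (target_y : Int) (out : Int) : Prop := out = calc_py_alt target_x target_y
instance (target_x : Int) (target_y : Int) (out : Int) : Decidable (Spec_calc_py target_x target_y out) := by unfold Spec_calc_py; infer_instance

-- ===== CLAIM (what is proved, stated in full; the proofs are below) =====
def Claim_equal_calc_py : Prop := ∀ (target_x : Int) (target_y : Int), Dom_calc_py target_x target_y → Pre_calc_py target_x target_y → Spec_calc_py target_x target_y (calc_py target_x target_y)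

-- ===== LEMMAS AND PROOFS =====

lemma pvTri_succ (s : Nat) : pvTri (s + 1) = pvTri s + (s + 1) := by
  unfold pvTri
  have h : (s + 1) * (s + 1 + 1) = s * (s + 1) + (s + 1) * 2 := by ring
  rw [h, Nat.add_mul_div_right _ _ (by norm_num)]

lemma pvTri_mono {s t : Nat} (h : s ≤ t) : pvTri s ≤ pvTri t := by
  induction t with
  | zero => simp [Nat.le_zero.mp h]
  | succ t ih =>
    rcases Nat.lt_or_ge s (t + 1) with h' | h'
    · exact le_trans (ih (Nat.lt_succ_iff.mp h')) (by rw [pvTri_succ]; omega)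
    · have : s = t + 1 := le_antisymm h h'
      simp [this]

-- strict monotonicity along anti-diagonals
lemma pvIdxN_lt {a b a' b' : Nat} (h : a + b < a' + b') :
    pvTri (a + b) + a < pvTri (a' + b') + a' := by
  have h2 : pvTri (a + b) + (a + b) < pvTri (a + b + 1) := by rw [pvTri_succ]; omega
  have h3 : pvTri (a + b + 1) ≤ pvTri (a' + b') := pvTri_mono h
  omega

lemma pvIdxN_inj {a b a' b' : Nat} (h : pvTri (a + b) + a = pvTri (a' + b') + a') :
    a = a' ∧ b = b' := by
  rcases Nat.lt_trichotomy (a + b) (a' + b') with hs | hs | hs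
  · exact absurd h (Nat.ne_of_lt (pvIdxN_lt hs))
  · rw [hs] at h
    constructor <;> omega
  · exact absurd h.symm (Nat.ne_of_lt (pvIdxN_lt hs))

lemma pvIdx_inj {x y x' y' : Int} (hx : 1 ≤ x) (hy : 1 ≤ y) (hx' : 1 ≤ x') (hy' : 1 ≤ y')
    (h : pvIdx x y = pvIdx x' y') : x = x' ∧ y = y' := by
  unfold pvIdx at h
  obtain ⟨h1, h2⟩ := pvIdxN_inj h
  omega

-- one loop step increments the index
lemma pvIdx_step_mid {x y : Int} (hx : 1 ≤ x) (hy : 2 ≤ y) :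
    pvIdx (x + 1) (y - 1) = pvIdx x y + 1 := by
  unfold pvIdx
  have h1 : (x + 1 - 1).toNat = (x - 1).toNat + 1 := by omega
  have h2 : (y - 1 - 1).toNat = (y - 1).toNat - 1 := by omega
  have h3 : 1 ≤ (y - 1).toNat := by omega
  rw [h1, h2]
  have h4 : (x - 1).toNat + 1 + ((y - 1).toNat - 1) = (x - 1).toNat + (y - 1).toNat := by omega
  rw [h4]
  omega

lemma pvIdx_step_wrap {x : Int} (hx : 1 ≤ x) :
    pvIdx 1 (x + 1) = pvIdx x 1 + 1 := by
  unfold pvIdx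
  have h1 : ((1 : Int) - 1).toNat = 0 := by norm_num
  have h2 : (x + 1 - 1).toNat = (x - 1).toNat + 1 := by omega
  rw [h1, h2]
  simp only [Nat.zero_add, Nat.add_zero]
  rw [pvTri_succ]
  omega

-- main loop characterisation: with s steps left, result = (v * 252533^s) % 33554393
lemma calcLoop_eq (s : Nat) : ∀ (fuel : Nat) (tx ty x y v : Int),
    1 ≤ tx → 1 ≤ ty → 1 ≤ x → 1 ≤ y →
    pvIdx tx ty = pvIdx x y + s → s ≤ fuel → 0 ≤ v → v < 33554393 →
    calcLoop fuel tx ty x y v = (v * 252533 ^ s) % 33554393 := by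
  induction s with
  | zero =>
    intro fuel tx ty x y v htx hty hx hy hidx hfuel hv0 hv1
    obtain ⟨hxe, hye⟩ := pvIdx_inj hx hy htx hty (by omega)
    have hval : (v * 252533 ^ 0) % 33554393 = v := by
      simp [Int.emod_eq_of_lt hv0 hv1]
    rw [hval]
    cases fuel with
    | zero => simp [calcLoop]
    | succ f => simp [calcLoop, hxe, hye]
  | succ s ih =>
    intro fuel tx ty x y v htx hty hx hy hidx hfuel hv0 hv1
    cases fuel with
    | zero => omega
    | succ f =>
      have hcond : x ≠ tx ∨ y ≠ ty := by
        rcases eq_or_ne x tx with h1 | h1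
        · rcases eq_or_ne y ty with h2 | h2
          · subst h1; subst h2; omega
          · exact Or.inr h2
        · exact Or.inl h1
      have hv0' : 0 ≤ (v * 252533) % 33554393 := Int.emod_nonneg _ (by norm_num)
      have hv1' : (v * 252533) % 33554393 < 33554393 := Int.emod_lt_of_pos _ (by norm_num)
      have hmul : v * 252533 % 33554393 * 252533 ^ s % 33554393
          = v * 252533 ^ (s + 1) % 33554393 := by
        have h : v * 252533 ^ (s + 1) = v * 252533 * 252533 ^ s := by ring
        rw [h, Int.mul_emod (v * 252533) (252533 ^ s),
            Int.mul_emod (v * 252533 % 33554393) (252533 ^ s),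
            Int.emod_emod_of_dvd _ dvd_rfl]
      have hunf : calcLoop (f + 1) tx ty x y v =
          if x ≠ tx ∨ y ≠ ty then
            (let p : Int × Int := if y - 1 = 0 then (1, x + 1) else (x + 1, y - 1);
             calcLoop f tx ty p.1 p.2 ((v * 252533) % 33554393))
          else v := rfl
      rw [hunf, if_pos hcond]
      by_cases hw : y - 1 = 0
      · -- wrap to the next diagonal
        have hy1 : y = 1 := by omega
        subst hy1
        have hstep := pvIdx_step_wrap hx
        rw [if_pos hw]
        exact (ih f tx ty 1 (x + 1) _ htx hty (by norm_num) (by omega)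
          (by rw [hstep]; omega) (by omega) hv0' hv1').trans hmul
      · have hy2 : 2 ≤ y := by omega
        have hstep := pvIdx_step_mid hx hy2
        rw [if_neg hw]
        exact (ih f tx ty (x + 1) (y - 1) _ htx hty (by omega) (by omega)
          (by rw [hstep]; omega) (by omega) hv0' hv1').trans hmul

lemma powmod_eq (b : Int) (e : Nat) (m : Int) :
    powmod b e m = b ^ e % m := by
  induction e using Nat.strong_induction_on with
  | _ e ih =>
    rw [powmod]
    by_cases he : e = 0
    · simp [he]
    · simp only [he, if_false]
      have hlt : e / 2 < e := Nat.div_lt_self (Nat.pos_of_ne_zero he) (by omega)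
      rw [ih _ hlt]
      have hsq : b ^ (e / 2) % m * (b ^ (e / 2) % m) % m = b ^ (2 * (e / 2)) % m := by
        conv_rhs => rw [two_mul, pow_add, Int.mul_emod]
      by_cases hp : e % 2 = 1
      · simp only [hp, if_true]
        rw [hsq, ← Int.mul_emod, ← pow_succ]
        have h2 : 2 * (e / 2) + 1 = e := by omega
        rw [h2]
      · simp only [hp, if_false]
        rw [hsq]
        have h2 : 2 * (e / 2) = e := by omega
        rw [h2]

-- the closed-form index of B equals the step count of A
lemma pvIdx_closed (tx ty : Int) (htx : 1 ≤ tx) (hty : 1 ≤ ty) :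
    (PySem.Int.floordiv ((tx + ty - 2) * (tx + ty - 2 + 1)) 2 + (tx - 1)).toNat
      = pvIdx tx ty := by
  unfold pvIdx pvTri
  set a := (tx - 1).toNat with ha
  set b := (ty - 1).toNat with hb
  have hxa : tx - 1 = (a : Int) := by omega
  have hd : tx + ty - 2 = ((a + b : Nat) : Int) := by push_cast; omega
  have hdvd : 2 ∣ (a + b) * (a + b + 1) := (Nat.even_mul_succ_self (a + b)).two_dvd
  have hK : 2 * ((a + b) * (a + b + 1) / 2) = (a + b) * (a + b + 1) := Nat.mul_div_cancel' hdvd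
  have hnum : (tx + ty - 2) * (tx + ty - 2 + 1) = (((a + b) * (a + b + 1) : Nat) : Int) := by
    rw [hd]; push_cast; ring
  rw [PySem.Int.floordiv_eq_ediv_of_pos (by norm_num), hnum, hxa]
  have hKi : (((a + b) * (a + b + 1) : Nat) : Int)
      = 2 * (((a + b) * (a + b + 1) / 2 : Nat) : Int) := by exact_mod_cast hK.symm
  omega

-- ===== VERDICT (by name: the statement is the Claim_ definition above) =====
theorem calc_py_spec : Claim_equal_calc_py := by
  intro tx ty _ hpre
  obtain ⟨htx, hty⟩ := hpre
  unfold Spec_calc_py calc_py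
  have hA := calcLoop_eq (pvIdx tx ty) (pvIdx tx ty) tx ty 1 1 20151125
    htx hty (by norm_num) (by norm_num)
    (by simp [pvIdx, pvTri]) (le_refl _) (by norm_num) (by norm_num)
  rw [hA]
  have hB : calc_py_alt tx ty =
      (20151125 * powmod 252533
        ((PySem.Int.floordiv ((tx + ty - 2) * (tx + ty - 2 + 1)) 2 + (tx - 1)).toNat)
        33554393) % 33554393 := rfl
  rw [hB, pvIdx_closed tx ty htx hty, powmod_eq _ _ _]
  conv_rhs => rw [Int.mul_emod, Int.emod_emod_of_dvd _ dvd_rfl, ← Int.mul_emod]
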